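-- pv_equiv track=rewrite | github.com/FranciscoFVC/Waste-Collection-Route-Optimization | Heuristica.py | ciclos
-- ===== SOURCE A (Python) =====
-- def ciclos(ruta):
--     lista_ciclos = []
--     n = len(ruta)
--     for inicio in range(n - 1):
--         for fin in range(inicio + 1, n):
--             if ruta[inicio] == ruta[fin]:
--                 sub_ciclo = ruta[inicio:fin + 1]
--                 # Requisitos: >= 3 nodos y no sea el tour entero
--                 if len(sub_ciclo) > 2 and not (inicio == 0 and fin == n - 1):
--                     lista_ciclos.append(sub_ciclo)
--     return lista_ciclos
-- ===== SOURCE B (Python) =====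
-- def ciclos(ruta):
--     n = len(ruta)
--     pos = {}
--     for i, v in enumerate(ruta):
--         pos.setdefault(v, []).append(i)
--     lista_ciclos = []
--     for inicio in range(n - 1):
--         for fin in pos[ruta[inicio]]:
--             if fin >= inicio + 2 and not (inicio == 0 and fin == n - 1):
--                 lista_ciclos.append(ruta[inicio:fin + 1])
--     return lista_ciclos
-- ===== Notes on version B (the rewrite author's own statement) =====
-- stated objective: alternative
-- what changed: B builds a dict mapping each value to its index list in one pass, then for each start index iterates only over the later occurrences of the same value, instead of A's nested scan over all later positions.
import Mathlib
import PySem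

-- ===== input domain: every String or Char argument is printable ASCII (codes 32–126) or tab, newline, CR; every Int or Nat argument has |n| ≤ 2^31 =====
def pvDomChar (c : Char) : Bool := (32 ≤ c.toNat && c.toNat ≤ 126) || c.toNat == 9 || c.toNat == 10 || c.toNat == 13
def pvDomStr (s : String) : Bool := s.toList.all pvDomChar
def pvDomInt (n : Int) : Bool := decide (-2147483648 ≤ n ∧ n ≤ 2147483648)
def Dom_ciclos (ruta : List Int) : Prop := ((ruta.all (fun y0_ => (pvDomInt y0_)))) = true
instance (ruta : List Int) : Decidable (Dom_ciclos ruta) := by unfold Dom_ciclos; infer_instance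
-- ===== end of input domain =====

-- B groups the indices of each value in one dict pass, then for each 'inicio' visits only the
-- later occurrences of the same value instead of scanning the whole tail (a different traversal;
-- same output, same order).

-- ===== PORT A =====
def ciclos (ruta : List Int) : List (List Int) :=
  let n : Int := ruta.length
  (PySem.List.pyRange 0 (n - 1)).foldl (fun acc inicio =>
    (PySem.List.pyRange (inicio + 1) n).foldl (fun acc2 fin =>
      if PySem.List.pyGetD ruta inicio 0 = PySem.List.pyGetD ruta fin 0 then
        let sub := PySem.List.slice ruta (some inicio) (some (fin + 1))
        if 2 < (sub.length : Int) ∧ ¬(inicio = 0 ∧ fin = n - 1) then acc2 ++ [sub] else acc2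
      else acc2) acc) []

-- ===== PORT B =====
def ciclos_alt (ruta : List Int) : List (List Int) :=
  let n : Int := ruta.length
  let pos : PySem.Dict Int (List Int) :=
    (PySem.List.enumerate ruta).foldl
      (fun d p => d.modify p.2 [] (fun l => l ++ [p.1])) PySem.Dict.empty
  (PySem.List.pyRange 0 (n - 1)).foldl (fun acc inicio =>
    (pos.getD (PySem.List.pyGetD ruta inicio 0) []).foldl (fun acc2 fin =>
      if inicio + 2 ≤ fin ∧ ¬(inicio = 0 ∧ fin = n - 1) then
        acc2 ++ [PySem.List.slice ruta (some inicio) (some (fin + 1))]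
      else acc2) acc) []

-- ===== PRECONDITION & SPEC =====
def Spec_ciclos (ruta : List Int) (out : List (List Int)) : Prop := out = ciclos_alt ruta
instance (ruta : List Int) (out : List (List Int)) : Decidable (Spec_ciclos ruta out) := by unfold Spec_ciclos; infer_instance

-- ===== CLAIM (what is proved, stated in full; the proofs are below) =====
def Claim_equal_ciclos : Prop := ∀ (ruta : List Int), Dom_ciclos ruta → Spec_ciclos ruta (ciclos ruta)

-- ===== LEMMAS AND PROOFS =====

-- The grouping dict of B: looking up v yields exactly the positions of v in ruta, in order.
lemma pos_getD (ruta : List Int) (v : Int) :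
    ((PySem.List.enumerate ruta).foldl
      (fun d p => d.modify p.2 [] (fun l => l ++ [p.1])) PySem.Dict.empty).getD v []
    = (PySem.List.pyRange 0 ruta.length).filter
        (fun j => PySem.List.pyGetD ruta j 0 == v) := by
  have h1 : (PySem.List.enumerate ruta).foldl
      (fun d p => d.modify p.2 [] (fun l => l ++ [p.1])) PySem.Dict.empty
      = ((PySem.List.enumerate ruta).map Prod.swap).foldl
      (fun d p => d.modify p.1 [] (fun l => l ++ [p.2])) PySem.Dict.empty := by
    rw [List.foldl_map]; rfl
  rw [h1, PySem.Dict.getD_foldl_modify_append]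
  rw [PySem.List.enumerate_eq_map_pyRange ruta 0]
  simp [List.filter_map, List.map_map, Function.comp_def, Prod.swap]

-- pyRange a n is the ≥ a part of pyRange 0 n.
lemma pyRange_from_eq_filter (a n : Int) (h0 : 0 ≤ a) :
    PySem.List.pyRange a n = (PySem.List.pyRange 0 n).filter (fun j => decide (a ≤ j)) := by
  by_cases h : a ≤ n
  · rw [PySem.List.pyRange_one_append 0 a n h0 h, List.filter_append]
    have e1 : (PySem.List.pyRange 0 a).filter (fun j => decide (a ≤ j)) = [] := by
      rw [List.filter_eq_nil_iff]; intro j hj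
      rw [PySem.List.mem_pyRange_one] at hj; simp; omega
    have e2 : (PySem.List.pyRange a n).filter (fun j => decide (a ≤ j)) = PySem.List.pyRange a n := by
      rw [List.filter_eq_self]; intro j hj
      rw [PySem.List.mem_pyRange_one] at hj; simp; omega
    rw [e1, e2, List.nil_append]
  · have e1 : PySem.List.pyRange a n = [] := by
      by_contra hne
      obtain ⟨x, hx⟩ := List.exists_mem_of_ne_nil _ hne
      rw [PySem.List.mem_pyRange_one] at hx; omega
    have e2 : (PySem.List.pyRange 0 n).filter (fun j => decide (a ≤ j)) = [] := by
      rw [List.filter_eq_nil_iff]; intro j hj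
      rw [PySem.List.mem_pyRange_one] at hj; simp; omega
    rw [e1, e2]

-- length of the slice ruta[inicio:fin+1] inside bounds
lemma slice_len (ruta : List Int) (inicio fin : Int) (h0 : 0 ≤ inicio) (h1 : inicio ≤ fin)
    (h2 : fin < (ruta.length : Int)) :
    ((PySem.List.slice ruta (some inicio) (some (fin + 1))).length : Int) = fin + 1 - inicio := by
  obtain ⟨i, rfl⟩ : ∃ i : Nat, inicio = (i : Int) := ⟨inicio.toNat, by omega⟩
  obtain ⟨f, hf⟩ : ∃ f : Nat, fin + 1 = (f : Int) := ⟨(fin + 1).toNat, by omega⟩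
  rw [hf, PySem.List.slice_natCast, List.length_take, List.length_drop]
  omega

-- the two inner loops agree, for any inicio produced by the outer loop
lemma inner_eq (ruta : List Int) (inicio : Int) (h0 : 0 ≤ inicio)
    (h1 : inicio < (ruta.length : Int) - 1) (acc : List (List Int)) :
    (PySem.List.pyRange (inicio + 1) ruta.length).foldl (fun acc2 fin =>
      if PySem.List.pyGetD ruta inicio 0 = PySem.List.pyGetD ruta fin 0 then
        let sub := PySem.List.slice ruta (some inicio) (some (fin + 1))
        if 2 < (sub.length : Int) ∧ ¬(inicio = 0 ∧ fin = (ruta.length : Int) - 1) then acc2 ++ [sub] else acc2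
      else acc2) acc
    = (((PySem.List.enumerate ruta).foldl
          (fun d p => d.modify p.2 [] (fun l => l ++ [p.1])) PySem.Dict.empty).getD (PySem.List.pyGetD ruta inicio 0) []).foldl
        (fun acc2 fin =>
          if inicio + 2 ≤ fin ∧ ¬(inicio = 0 ∧ fin = (ruta.length : Int) - 1) then
            acc2 ++ [PySem.List.slice ruta (some inicio) (some (fin + 1))]
          else acc2) acc := by
  have hA : (PySem.List.pyRange (inicio + 1) ruta.length).foldl (fun acc2 fin =>
      if PySem.List.pyGetD ruta inicio 0 = PySem.List.pyGetD ruta fin 0 then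
        let sub := PySem.List.slice ruta (some inicio) (some (fin + 1))
        if 2 < (sub.length : Int) ∧ ¬(inicio = 0 ∧ fin = (ruta.length : Int) - 1) then acc2 ++ [sub] else acc2
      else acc2) acc
      = (PySem.List.pyRange (inicio + 1) ruta.length).foldl (fun acc2 fin =>
      if PySem.List.pyGetD ruta fin 0 = PySem.List.pyGetD ruta inicio 0
          ∧ inicio + 2 ≤ fin ∧ ¬(inicio = 0 ∧ fin = (ruta.length : Int) - 1) then
        acc2 ++ [PySem.List.slice ruta (some inicio) (some (fin + 1))] else acc2) acc := by
    apply PySem.List.foldl_congr_mem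
    intro acc2 fin hfin
    rw [PySem.List.mem_pyRange_one] at hfin
    have hl := slice_len ruta inicio fin h0 (by omega) (by omega)
    show (if PySem.List.pyGetD ruta inicio 0 = PySem.List.pyGetD ruta fin 0 then
        if 2 < ((PySem.List.slice ruta (some inicio) (some (fin + 1))).length : Int)
            ∧ ¬(inicio = 0 ∧ fin = (ruta.length : Int) - 1)
        then acc2 ++ [PySem.List.slice ruta (some inicio) (some (fin + 1))] else acc2
      else acc2) = _
    rw [← ite_and]
    apply if_congr _ rfl rfl
    rw [hl]
    constructor
    · rintro ⟨a, b, c⟩; exact ⟨a.symm, by omega, c⟩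
    · rintro ⟨a, b, c⟩; exact ⟨a.symm, by omega, c⟩
  rw [hA, pos_getD]
  rw [PySem.List.foldl_append_ite
        (p := fun fin => PySem.List.pyGetD ruta fin 0 = PySem.List.pyGetD ruta inicio 0
          ∧ inicio + 2 ≤ fin ∧ ¬(inicio = 0 ∧ fin = (ruta.length : Int) - 1))
        (f := fun fin => PySem.List.slice ruta (some inicio) (some (fin + 1)))]
  rw [PySem.List.foldl_append_ite
        (p := fun fin => inicio + 2 ≤ fin ∧ ¬(inicio = 0 ∧ fin = (ruta.length : Int) - 1))
        (f := fun fin => PySem.List.slice ruta (some inicio) (some (fin + 1)))]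
  congr 1
  rw [pyRange_from_eq_filter (inicio + 1) ruta.length (by omega), List.filter_filter, List.filter_filter]
  congr 1
  apply List.filter_congr
  intro j hj
  rw [PySem.List.mem_pyRange_one] at hj
  rw [Bool.eq_iff_iff]
  simp only [Bool.and_eq_true, decide_eq_true_eq, beq_iff_eq]
  constructor
  · rintro ⟨⟨a, b, c⟩, d⟩; exact ⟨⟨b, c⟩, a⟩
  · rintro ⟨⟨b, c⟩, a⟩; exact ⟨⟨a, b, c⟩, by omega⟩

-- ===== VERDICT (by name: the statement is the Claim_ definition above) =====
theorem ciclos_spec : Claim_equal_ciclos := by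
  intro ruta _
  show ciclos ruta = ciclos_alt ruta
  unfold ciclos ciclos_alt
  apply PySem.List.foldl_congr_mem
  intro acc inicio hmem
  rw [PySem.List.mem_pyRange_one] at hmem
  exact inner_eq ruta inicio hmem.1 hmem.2 acc
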